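-- pv_equiv track=rewrite | github.com/Python-in-my-heart/report_generator | script/report_generator/csv_reader.py | normalize_field_names
-- ===== SOURCE A (Python) =====
-- from collections import defaultdict
--
-- def normalize_field_names(headers: list[str]) -> dict[str, str]:
--     """Нормализует названия колонок из CSV."""
--     field_map = defaultdict(list, {
--         'hourly_rate': ['hourly_rate', 'rate', 'salary'],
--         'hours_worked': ['hours_worked', 'hours'],
--         'name': ['name'],
--         'department': ['department']
--     })
--     normalized = {}
--     for header in headers:
--         for field, aliases in field_map.items():
--             if header in aliases:
--                 normalized[field] = header
--                 break
--     return normalized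
-- ===== SOURCE B (Python) =====
-- _REVERSE = {
--     'hourly_rate': 'hourly_rate', 'rate': 'hourly_rate', 'salary': 'hourly_rate',
--     'hours_worked': 'hours_worked', 'hours': 'hours_worked',
--     'name': 'name',
--     'department': 'department',
-- }
--
-- def normalize_field_names(headers: list[str]) -> dict[str, str]:
--     """Нормализует названия колонок из CSV (reverse-index version)."""
--     normalized = {}
--     for header in headers:
--         field = _REVERSE.get(header)
--         if field is not None:
--             normalized[field] = header
--     return normalized
-- ===== Notes on version B (the rewrite author's own statement) =====
-- stated objective: faster
-- what changed: Replaces the per-header inner scan over field_map's alias lists with a single prebuilt alias->field reverse dict and one flat lookup per header.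
import Mathlib
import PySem

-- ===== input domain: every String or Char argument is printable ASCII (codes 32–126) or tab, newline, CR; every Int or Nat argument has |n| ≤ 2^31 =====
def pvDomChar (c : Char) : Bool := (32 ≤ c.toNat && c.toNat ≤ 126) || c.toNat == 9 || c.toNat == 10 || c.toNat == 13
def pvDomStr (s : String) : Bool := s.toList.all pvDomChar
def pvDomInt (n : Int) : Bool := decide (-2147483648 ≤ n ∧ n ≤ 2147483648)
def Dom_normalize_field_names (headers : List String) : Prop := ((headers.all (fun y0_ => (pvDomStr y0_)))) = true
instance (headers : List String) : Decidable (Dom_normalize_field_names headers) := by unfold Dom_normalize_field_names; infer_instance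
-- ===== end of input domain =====

-- B builds one alias->field reverse dict and does a flat lookup per header; A scans every field's alias list per header.

-- ===== PORT A =====
-- the literal field_map of A, in insertion order
def pvFieldMap : List (String × List String) :=
  [("hourly_rate", ["hourly_rate", "rate", "salary"]),
   ("hours_worked", ["hours_worked", "hours"]),
   ("name", ["name"]),
   ("department", ["department"])]

-- the inner 'for field, aliases ... if header in aliases: insert; break' loop
def pvInnerA (fm : List (String × List String)) (d : PySem.Dict String String) (header : String) :
    PySem.Dict String String :=
  match fm with
  | [] => d
  | (field, aliases) :: rest =>
      if aliases.contains header then d.insert field header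
      else pvInnerA rest d header

def normalize_field_names (headers : List String) : List (String × String) :=
  (headers.foldl (fun d h => pvInnerA pvFieldMap d h) PySem.Dict.empty).items

-- ===== PORT B =====
def pvReverse : PySem.Dict String String :=
  PySem.Dict.mk  -- the dict literal of Source B (distinct keys, insertion order)
    [("hourly_rate", "hourly_rate"), ("rate", "hourly_rate"), ("salary", "hourly_rate"),
     ("hours_worked", "hours_worked"), ("hours", "hours_worked"),
     ("name", "name"), ("department", "department")]

def normalize_field_names_alt (headers : List String) : List (String × String) :=
  (headers.foldl
    (fun d h =>
      match pvReverse.get? h with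
      | some field => d.insert field h
      | none => d)
    PySem.Dict.empty).items

-- ===== PRECONDITION & SPEC =====
def Spec_normalize_field_names (headers : List String) (out : List (String × String)) : Prop := out = normalize_field_names_alt headers
instance (headers : List String) (out : List (String × String)) : Decidable (Spec_normalize_field_names headers out) := by unfold Spec_normalize_field_names; infer_instance

-- ===== CLAIM (what is proved, stated in full; the proofs are below) =====
def Claim_equal_normalize_field_names : Prop := ∀ (headers : List String), Dom_normalize_field_names headers → Spec_normalize_field_names headers (normalize_field_names headers)

-- ===== LEMMAS AND PROOFS =====

-- the two per-header steps agree: A's first matching field is B's reverse lookup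
theorem pvStep_eq (d : PySem.Dict String String) (h : String) :
    pvInnerA pvFieldMap d h =
      (match pvReverse.get? h with
       | some field => d.insert field h
       | none => d) := by
  by_cases h1 : h = "hourly_rate"; · subst h1; rfl
  by_cases h2 : h = "rate"; · subst h2; rfl
  by_cases h3 : h = "salary"; · subst h3; rfl
  by_cases h4 : h = "hours_worked"; · subst h4; rfl
  by_cases h5 : h = "hours"; · subst h5; rfl
  by_cases h6 : h = "name"; · subst h6; rfl
  by_cases h7 : h = "department"; · subst h7; rfl
  have b1 : ("hourly_rate" == h) = false := by simpa using Ne.symm h1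
  have b2 : ("rate" == h) = false := by simpa using Ne.symm h2
  have b3 : ("salary" == h) = false := by simpa using Ne.symm h3
  have b4 : ("hours_worked" == h) = false := by simpa using Ne.symm h4
  have b5 : ("hours" == h) = false := by simpa using Ne.symm h5
  have b6 : ("name" == h) = false := by simpa using Ne.symm h6
  have b7 : ("department" == h) = false := by simpa using Ne.symm h7
  simp [pvInnerA, pvFieldMap, pvReverse, PySem.Dict.get?,
    h1, h2, h3, h4, h5, h6, h7, b1, b2, b3, b4, b5, b6, b7]

-- ===== VERDICT (by name: the statement is the Claim_ definition above) =====
theorem normalize_field_names_spec : Claim_equal_normalize_field_names := by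
  intro headers _
  unfold Spec_normalize_field_names normalize_field_names normalize_field_names_alt
  congr 1
  congr 1
  funext d h
  exact pvStep_eq d h
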